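-- pv_equiv track=rewrite | github.com/bakunobu/exercise | 1400_basic_tasks/chap_6/6_42.py | min_max_sum
-- ===== SOURCE A (Python) =====
-- def min_max_sum(n:int) -> int:
--     min_dig = 9
--     max_dig = 0
--     while n:
--         num =  n % 10
--         if num < min_dig:
--             min_dig = num
--         if num > max_dig:
--             max_dig = num
--         n //= 10
--     return(min_dig + max_dig)
-- ===== SOURCE B (Python) =====
-- def min_max_sum(n: int) -> int:
--     def digits(m):
--         return [m] if m < 10 else digits(m // 10) + [m % 10]
--     ds = digits(n)
--     return min(ds) + max(ds)
-- ===== Notes on version B (the rewrite author's own statement) =====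
-- stated objective: simpler
-- what changed: Replaces the branchy while-loop tracking two running extrema with a recursive digit-list decomposition followed by the built-in min and max reductions; for n==0 B returns 0 (digits of 0 are [0]) instead of A's leftover sentinel sum 9.
-- intended difference: On n = 0, A returns 9 (its min_dig=9/max_dig=0 sentinels are never updated because the loop body never runs), while B returns 0, the actual min digit plus max digit of 0, which is the intended value. — e.g. on min_max_sum(0): A returns 9, B returns 0
-- outside the precondition, e.g. on min_max_sum(-7): A does not finish within the time limit, B returns -14
import Mathlib
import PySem

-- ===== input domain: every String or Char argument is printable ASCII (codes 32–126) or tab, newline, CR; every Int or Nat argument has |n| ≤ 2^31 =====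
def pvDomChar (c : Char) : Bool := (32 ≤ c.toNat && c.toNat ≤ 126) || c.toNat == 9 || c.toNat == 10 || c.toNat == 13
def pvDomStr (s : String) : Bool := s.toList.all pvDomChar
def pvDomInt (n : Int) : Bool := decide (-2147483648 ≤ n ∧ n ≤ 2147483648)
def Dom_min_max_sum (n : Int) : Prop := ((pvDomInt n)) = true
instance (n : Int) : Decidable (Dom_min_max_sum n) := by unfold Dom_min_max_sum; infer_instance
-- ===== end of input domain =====

-- B replaces A's branchy running-extrema while-loop by a recursive digit-list build plus
-- min/max reductions (objective: simpler); on n = 0 B returns 0 instead of A's sentinel 9 (see D_).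

-- ===== PORT A =====
-- Python's `while n:` loop diverges for n < 0 (excluded by Pre_); the guard `0 < n`
-- makes the port total and agrees with `n != 0` on all of Pre_.
def min_max_sum_loop (mn mx n : Int) : Int :=
  if _h : 0 < n then
    let num := PySem.Int.mod n 10
    let mn' := if num < mn then num else mn
    let mx' := if num > mx then num else mx
    min_max_sum_loop mn' mx' (PySem.Int.floordiv n 10)
  else mn + mx
termination_by n.toNat
decreasing_by
  simp only [PySem.Int.floordiv, Int.fdiv_eq_ediv]
  omega

def min_max_sum (n : Int) : Int := min_max_sum_loop 9 0 n

-- ===== PORT B =====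
def min_max_sum_digits (m : Int) : List Int :=
  if _h : m < 10 then [m]
  else min_max_sum_digits (PySem.Int.floordiv m 10) ++ [PySem.Int.mod m 10]
termination_by m.toNat
decreasing_by
  simp only [PySem.Int.floordiv, Int.fdiv_eq_ediv]
  omega

def min_max_sum_alt (n : Int) : Int :=
  let ds := min_max_sum_digits n
  -- min(ds) + max(ds); ds is never empty, the fallback 0 is unreachable
  match PySem.List.min? ds (fun y => y), PySem.List.max? ds (fun y => y) with
  | some a, some b => a + b
  | _, _ => 0

-- ===== PRECONDITION & SPEC =====
-- Pre_ excludes n < 0, on which A's while-loop never terminates (n // 10 stalls at -1).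
def Pre_min_max_sum (n : Int) : Prop := 0 ≤ n
instance (n : Int) : Decidable (Pre_min_max_sum n) := by unfold Pre_min_max_sum; infer_instance
def pvWitness_min_max_sum : Int := 407

-- On n = 0 the loop body of A never runs, so A returns its sentinels' sum 9; B returns 0,
-- the true smallest-plus-largest digit of 0, which is the intended value.
def D_min_max_sum (n : Int) : Prop := n = 0
instance (n : Int) : Decidable (D_min_max_sum n) := by unfold D_min_max_sum; infer_instance

def Spec_min_max_sum (n : Int) (out : Int) : Prop := ¬ D_min_max_sum n → out = min_max_sum_alt n
instance (n : Int) (out : Int) : Decidable (Spec_min_max_sum n out) := by unfold Spec_min_max_sum; infer_instance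

def pvDiffWitness_min_max_sum : Int := 0
def pvDiffWitnessOut_min_max_sum : Int × Int := (9, 0)

-- ===== CLAIM (what is proved, stated in full; the proofs are below) =====
def Claim_unchanged_min_max_sum : Prop := ∀ (n : Int), Dom_min_max_sum n → Pre_min_max_sum n → Spec_min_max_sum n (min_max_sum n)
def Claim_changed_min_max_sum : Prop := Dom_min_max_sum (pvDiffWitness_min_max_sum) ∧ Pre_min_max_sum (pvDiffWitness_min_max_sum) ∧ D_min_max_sum (pvDiffWitness_min_max_sum) ∧ min_max_sum (pvDiffWitness_min_max_sum) = pvDiffWitnessOut_min_max_sum.1 ∧ min_max_sum_alt (pvDiffWitness_min_max_sum) = pvDiffWitnessOut_min_max_sum.2 ∧ pvDiffWitnessOut_min_max_sum.1 ≠ pvDiffWitnessOut_min_max_sum.2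
def Claim_exact_min_max_sum : Prop := ∀ (n : Int), Dom_min_max_sum n → Pre_min_max_sum n → D_min_max_sum n → min_max_sum n ≠ min_max_sum_alt n

-- ===== LEMMAS AND PROOFS =====

theorem foldl_min_pull (l : List Int) : ∀ (a r : Int),
    List.foldl min (min a r) l = min (List.foldl min a l) r := by
  induction l with
  | nil => intro a r; rfl
  | cons b t ih =>
    intro a r
    simp only [List.foldl_cons]
    rw [min_right_comm a r b, ih]

theorem foldl_max_pull (l : List Int) : ∀ (a r : Int),
    List.foldl max (max a r) l = max (List.foldl max a l) r := by
  induction l with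
  | nil => intro a r; rfl
  | cons b t ih =>
    intro a r
    simp only [List.foldl_cons]
    rw [max_right_comm a r b, ih]

-- the loop is the min- and max-fold of the digit list
theorem loop_eq_folds (k : Nat) : ∀ (n mn mx : Int), n.toNat ≤ k → 0 < n →
    min_max_sum_loop mn mx n =
      List.foldl min mn (min_max_sum_digits n) + List.foldl max mx (min_max_sum_digits n) := by
  induction k with
  | zero => intro n _ _ hk hn; omega
  | succ k ih =>
    intro n mn mx hk hn
    rw [min_max_sum_loop, min_max_sum_digits]
    simp only [dif_pos hn]
    by_cases h10 : n < 10
    · -- last digit: the quotient is 0, the loop stops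
      rw [dif_pos h10]
      have hq : PySem.Int.floordiv n 10 = 0 := by
        simp only [PySem.Int.floordiv, Int.fdiv_eq_ediv]; omega
      have hm : PySem.Int.mod n 10 = n := by
        simp only [PySem.Int.mod, Int.fmod_eq_emod]; omega
      rw [hq, min_max_sum_loop]
      simp only [hm, List.foldl_cons, List.foldl_nil]
      rw [min_def, max_def]
      split_ifs <;> omega
    · rw [dif_neg h10]
      have hq : 0 < PySem.Int.floordiv n 10 ∧ (PySem.Int.floordiv n 10).toNat ≤ k := by
        simp only [PySem.Int.floordiv, Int.fdiv_eq_ediv]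
        omega
      rw [ih _ _ _ hq.2 hq.1]
      simp only [List.foldl_append, List.foldl_cons, List.foldl_nil]
      have e1 : (if PySem.Int.mod n 10 < mn then PySem.Int.mod n 10 else mn)
          = min mn (PySem.Int.mod n 10) := by
        rw [min_comm]; simp [min_def]; split_ifs with h1 h2 <;> omega
      have e2 : (if PySem.Int.mod n 10 > mx then PySem.Int.mod n 10 else mx)
          = max mx (PySem.Int.mod n 10) := by
        rw [max_comm]; simp [max_def]; split_ifs with h1 h2 <;> omega
      rw [e1, e2, foldl_min_pull, foldl_max_pull]

-- every digit of a positive n lies in [0, 9]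
theorem digits_bounds (k : Nat) : ∀ (n : Int), n.toNat ≤ k → 0 < n →
    ∀ x ∈ min_max_sum_digits n, 0 ≤ x ∧ x ≤ 9 := by
  induction k with
  | zero => intro n hk hn; omega
  | succ k ih =>
    intro n hk hn x hx
    rw [min_max_sum_digits] at hx
    by_cases h10 : n < 10
    · rw [dif_pos h10] at hx
      simp only [List.mem_singleton] at hx
      omega
    · rw [dif_neg h10] at hx
      simp only [List.mem_append, List.mem_singleton] at hx
      rcases hx with hx | hx
      · have hq : 0 < PySem.Int.floordiv n 10 ∧ (PySem.Int.floordiv n 10).toNat ≤ k := by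
          simp only [PySem.Int.floordiv, Int.fdiv_eq_ediv]; omega
        exact ih _ hq.2 hq.1 x hx
      · subst hx
        simp only [PySem.Int.mod, Int.fmod_eq_emod]
        omega

theorem digits_ne_nil (n : Int) : min_max_sum_digits n ≠ [] := by
  rw [min_max_sum_digits]
  split_ifs <;> simp

theorem min_max_sum_spec : Claim_unchanged_min_max_sum := by
  intro n _ hpre hD
  have hn : 0 < n := by
    unfold Pre_min_max_sum at hpre
    unfold D_min_max_sum at hD
    omega
  obtain ⟨d, t, hdt⟩ : ∃ d t, min_max_sum_digits n = d :: t := by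
    cases h : min_max_sum_digits n with
    | nil => exact absurd h (digits_ne_nil n)
    | cons d t => exact ⟨d, t, rfl⟩
  have hb : 0 ≤ d ∧ d ≤ 9 := by
    have := digits_bounds n.toNat n le_rfl hn d (by rw [hdt]; exact List.mem_cons_self ..)
    exact this
  show min_max_sum n = min_max_sum_alt n
  unfold min_max_sum min_max_sum_alt
  rw [loop_eq_folds n.toNat n 9 0 le_rfl hn, hdt]
  simp only [PySem.List.min?_id_cons, PySem.List.max?_id_cons, List.foldl_cons]
  have e1 : min (9 : Int) d = d := by omega
  have e2 : max (0 : Int) d = d := by omega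
  rw [e1, e2]

theorem min_max_sum_at_zero : min_max_sum 0 = 9 := by
  rw [min_max_sum, min_max_sum_loop]
  norm_num

theorem min_max_sum_alt_at_zero : min_max_sum_alt 0 = 0 := by
  rw [min_max_sum_alt]
  rw [min_max_sum_digits]
  norm_num [PySem.List.min?_id_cons, PySem.List.max?_id_cons]

theorem min_max_sum_changed : Claim_changed_min_max_sum := by
  unfold Claim_changed_min_max_sum
  refine ⟨by decide, by decide, by decide, ?_, ?_, by decide⟩
  · exact min_max_sum_at_zero
  · exact min_max_sum_alt_at_zero

theorem min_max_sum_tight : Claim_exact_min_max_sum := by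
  intro n _ _ hD
  unfold D_min_max_sum at hD
  subst hD
  rw [min_max_sum_at_zero, min_max_sum_alt_at_zero]
  decide
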